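-- pv_equiv track=rewrite | github.com/herehere14/humanoid_agent_world_simulation | examples/learned_brain/world_sim/scenarios.py | _make_schedule
-- ===== SOURCE A (Python) =====
-- def _make_schedule(role: str) -> dict[int, str]:
--     """Generate hourly schedule based on role."""
--     schedule = {}
--     for h in range(0, 6):
--         schedule[h] = "home"
--     for h in range(6, 8):
--         schedule[h] = "home"  # morning routine
--
--     if role == "office_worker":
--         for h in range(8, 17):
--             schedule[h] = "office"
--         for h in range(17, 19):
--             schedule[h] = "home"
--         schedule[19] = "bar"  # some evenings
--         for h in range(20, 22):
--             schedule[h] = "home"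
--     elif role == "manager":
--         for h in range(7, 18):
--             schedule[h] = "office"
--         for h in range(18, 22):
--             schedule[h] = "home"
--     elif role == "bartender":
--         for h in range(8, 14):
--             schedule[h] = "home"
--         for h in range(14, 23):
--             schedule[h] = "bar"
--     elif role == "teacher":
--         for h in range(7, 15):
--             schedule[h] = "school"
--         for h in range(15, 18):
--             schedule[h] = "home"
--         schedule[18] = "park"
--         for h in range(19, 22):
--             schedule[h] = "home"
--     elif role == "retiree":
--         for h in range(8, 11):
--             schedule[h] = "park"
--         for h in range(11, 14):
--             schedule[h] = "home"
--         schedule[14] = "church"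
--         for h in range(15, 22):
--             schedule[h] = "home"
--     else:
--         for h in range(8, 17):
--             schedule[h] = "office"
--         for h in range(17, 22):
--             schedule[h] = "home"
--
--     for h in range(22, 24):
--         schedule[h] = "home"
--
--     return schedule
-- ===== SOURCE B (Python) =====
-- _OVERRIDES = {
--     "office_worker": [(h, "office") for h in range(8, 17)] + [(19, "bar")],
--     "manager": [(h, "office") for h in range(7, 18)],
--     "bartender": [(h, "bar") for h in range(14, 22)],
--     "teacher": [(h, "school") for h in range(7, 15)] + [(18, "park")],
--     "retiree": [(h, "park") for h in range(8, 11)] + [(14, "church")],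
-- }
-- _DEFAULT = [(h, "office") for h in range(8, 17)]
--
-- def _make_schedule(role: str) -> dict[int, str]:
--     """Generate hourly schedule based on role."""
--     schedule = {h: "home" for h in range(24)}
--     for h, loc in _OVERRIDES.get(role, _DEFAULT):
--         schedule[h] = loc
--     return schedule
-- ===== Notes on version B (the rewrite author's own statement) =====
-- stated objective: simpler
-- what changed: Replaces the per-role sequences of range loops (with order-dependent overwrites) by one home-filled base dict plus a per-role table of (hour, location) overrides applied in a single loop.
import Mathlib
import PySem

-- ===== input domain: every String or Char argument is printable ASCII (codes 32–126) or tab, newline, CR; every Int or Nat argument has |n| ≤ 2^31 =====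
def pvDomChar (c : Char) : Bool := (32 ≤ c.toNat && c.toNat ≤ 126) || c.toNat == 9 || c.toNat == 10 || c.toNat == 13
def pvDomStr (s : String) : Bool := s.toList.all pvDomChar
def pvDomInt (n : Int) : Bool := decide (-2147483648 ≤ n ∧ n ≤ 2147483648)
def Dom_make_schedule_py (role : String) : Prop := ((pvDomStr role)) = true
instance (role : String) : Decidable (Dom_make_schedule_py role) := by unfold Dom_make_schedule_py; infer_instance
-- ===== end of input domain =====

-- B replaces A's per-role range loops by a home-filled base dict plus a per-role override table (simpler decomposition, same cost).

-- ===== PORT A =====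
def make_schedule_py (role : String) : List (Int × String) :=
  let s : PySem.Dict Int String := PySem.Dict.empty
  let s := (PySem.List.pyRange 0 6 1).foldl (fun d h => d.insert h "home") s
  let s := (PySem.List.pyRange 6 8 1).foldl (fun d h => d.insert h "home") s
  let s :=
    if role = "office_worker" then
      let s := (PySem.List.pyRange 8 17 1).foldl (fun d h => d.insert h "office") s
      let s := (PySem.List.pyRange 17 19 1).foldl (fun d h => d.insert h "home") s
      let s := s.insert 19 "bar"
      (PySem.List.pyRange 20 22 1).foldl (fun d h => d.insert h "home") s
    else if role = "manager" then
      let s := (PySem.List.pyRange 7 18 1).foldl (fun d h => d.insert h "office") s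
      (PySem.List.pyRange 18 22 1).foldl (fun d h => d.insert h "home") s
    else if role = "bartender" then
      let s := (PySem.List.pyRange 8 14 1).foldl (fun d h => d.insert h "home") s
      (PySem.List.pyRange 14 23 1).foldl (fun d h => d.insert h "bar") s
    else if role = "teacher" then
      let s := (PySem.List.pyRange 7 15 1).foldl (fun d h => d.insert h "school") s
      let s := (PySem.List.pyRange 15 18 1).foldl (fun d h => d.insert h "home") s
      let s := s.insert 18 "park"
      (PySem.List.pyRange 19 22 1).foldl (fun d h => d.insert h "home") s
    else if role = "retiree" then
      let s := (PySem.List.pyRange 8 11 1).foldl (fun d h => d.insert h "park") s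
      let s := (PySem.List.pyRange 11 14 1).foldl (fun d h => d.insert h "home") s
      let s := s.insert 14 "church"
      (PySem.List.pyRange 15 22 1).foldl (fun d h => d.insert h "home") s
    else
      let s := (PySem.List.pyRange 8 17 1).foldl (fun d h => d.insert h "office") s
      (PySem.List.pyRange 17 22 1).foldl (fun d h => d.insert h "home") s
  let s := (PySem.List.pyRange 22 24 1).foldl (fun d h => d.insert h "home") s
  s.items

-- ===== PORT B =====
def pvOverrides : PySem.Dict String (List (Int × String)) :=
  PySem.Dict.ofList
    [ ("office_worker", (PySem.List.pyRange 8 17 1).map (fun h => (h, "office")) ++ [(19, "bar")])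
    , ("manager", (PySem.List.pyRange 7 18 1).map (fun h => (h, "office")))
    , ("bartender", (PySem.List.pyRange 14 22 1).map (fun h => (h, "bar")))
    , ("teacher", (PySem.List.pyRange 7 15 1).map (fun h => (h, "school")) ++ [(18, "park")])
    , ("retiree", (PySem.List.pyRange 8 11 1).map (fun h => (h, "park")) ++ [(14, "church")]) ]

def pvDefault : List (Int × String) := (PySem.List.pyRange 8 17 1).map (fun h => (h, "office"))

def make_schedule_py_alt (role : String) : List (Int × String) :=
  let base : PySem.Dict Int String :=
    (PySem.List.pyRange 0 24 1).foldl (fun d h => d.insert h "home") PySem.Dict.empty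
  ((pvOverrides.getD role pvDefault).foldl (fun d p => d.insert p.1 p.2) base).items

-- ===== PRECONDITION & SPEC =====
def Spec_make_schedule_py (role : String) (out : List (Int × String)) : Prop := out = make_schedule_py_alt role
instance (role : String) (out : List (Int × String)) : Decidable (Spec_make_schedule_py role out) := by unfold Spec_make_schedule_py; infer_instance

-- ===== CLAIM (what is proved, stated in full; the proofs are below) =====
def Claim_equal_make_schedule_py : Prop := ∀ (role : String), Dom_make_schedule_py role → Spec_make_schedule_py role (make_schedule_py role)

-- ===== LEMMAS AND PROOFS =====

-- ===== VERDICT (by name: the statement is the Claim_ definition above) =====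
theorem make_schedule_py_spec : Claim_equal_make_schedule_py := by
  intro role _
  unfold Spec_make_schedule_py make_schedule_py make_schedule_py_alt
  by_cases h1 : role = "office_worker"
  · subst h1; decide
  by_cases h2 : role = "manager"
  · subst h2; decide
  by_cases h3 : role = "bartender"
  · subst h3; decide
  by_cases h4 : role = "teacher"
  · subst h4; decide
  by_cases h5 : role = "retiree"
  · subst h5; decide
  have hget : pvOverrides.get? role = none := by
    simp [pvOverrides, PySem.Dict.ofList, PySem.Dict.update, PySem.Dict.get?_insert,
      PySem.Dict.get?_empty, h1, h2, h3, h4, h5]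
  simp only [if_neg h1, if_neg h2, if_neg h3, if_neg h4, if_neg h5,
    PySem.Dict.getD_eq_get?_getD, hget]
  decide
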